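-- pv_equiv track=rewrite | github.com/Patg13/ADAPTI | Programmes/Programmes_Modules/Extraction_ITS/ITSx_filesplitter.py | CalculateRepartition
-- ===== SOURCE A (Python) =====
-- def CalculateRepartition(nbparts,nbseqs):
--     rep_list=[]
--     for i in range(0,nbparts):
--         rep_list.append(0)
--     ite=0
--     start_range=0
--     end_range=nbseqs-1
--     direction=1
--     while True:
--         rep_list[ite]+=1
--         start_range+=1
--         if start_range > end_range:
--             break
--         if (direction > 0):
--             ite+=1
--         if (direction < 0):
--             ite-=1
--         if ((direction > 0) and (ite == nbparts)):
--             direction=-1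
--             ite-=1
--             continue
--         if ((direction < 0) and (ite < 0)):
--             direction=1
--             ite+=1
--             continue
--
--     return rep_list
-- ===== SOURCE B (Python) =====
-- def CalculateRepartition(nbparts, nbseqs):
--     # The zigzag visits bins 0,1,...,nbparts-1,nbparts-1,...,1,0 -- a cycle of
--     # length 2*nbparts in which every bin occurs exactly twice; the original
--     # loop always places at least one item, so m = max(nbseqs, 1) items are
--     # distributed.  Each bin gets 2*full from the full cycles; the remainder
--     # covers a prefix of the forward sweep and, if it spills over, a suffix of
--     # the backward sweep -- so the result is at most three constant runs.
--     m = max(nbseqs, 1)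
--     full, rem = divmod(m, 2 * nbparts)
--     if rem <= nbparts:
--         return [2 * full + 1] * rem + [2 * full] * (nbparts - rem)
--     tail = rem - nbparts
--     return [2 * full + 1] * (nbparts - tail) + [2 * full + 2] * tail
-- ===== Notes on version B (the rewrite author's own statement) =====
-- stated objective: faster
-- what changed: B computes each bin's count in closed form -- full zigzag cycles of length 2*nbparts via divmod plus a remainder test per bin -- instead of walking the zigzag one sequence at a time.
import Mathlib
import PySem

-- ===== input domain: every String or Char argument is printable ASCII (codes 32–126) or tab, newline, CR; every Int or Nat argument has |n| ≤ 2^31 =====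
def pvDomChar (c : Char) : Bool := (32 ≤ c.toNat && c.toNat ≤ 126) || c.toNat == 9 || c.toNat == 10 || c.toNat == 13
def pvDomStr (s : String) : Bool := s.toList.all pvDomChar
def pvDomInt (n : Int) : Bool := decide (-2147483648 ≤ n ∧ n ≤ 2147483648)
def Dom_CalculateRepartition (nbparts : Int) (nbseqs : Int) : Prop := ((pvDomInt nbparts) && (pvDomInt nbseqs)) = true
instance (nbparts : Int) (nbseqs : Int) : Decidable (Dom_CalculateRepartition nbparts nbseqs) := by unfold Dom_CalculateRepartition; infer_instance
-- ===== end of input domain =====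

-- B replaces A's item-by-item zigzag walk (O(nbseqs) loop iterations) by an analytic
-- count per bin: full cycles of length 2*nbparts by division, plus the remainder.

-- ===== PORT A =====
-- the if-chain after the 'break' check: both 'continue's and the fall-through return
-- to the loop head, so they are the three tail positions of one step
def CalculateRepartition.next (nbparts : Int) (ite : Int) (direction : Int) : Int × Int :=
  let ite1 := if direction > 0 then ite + 1 else ite
  let ite2 := if direction < 0 then ite1 - 1 else ite1
  if direction > 0 ∧ ite2 = nbparts then (ite2 - 1, -1)
  else if direction < 0 ∧ ite2 < 0 then (ite2 + 1, 1)
  else (ite2, direction)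

-- the 'while True' loop of A
def CalculateRepartition.loop (nbparts : Int) (rep : List Int) (ite : Int)
    (start_range : Int) (end_range : Int) (direction : Int) : List Int :=
  match PySem.List.pyGet? rep ite with
  | none => rep        -- rep_list[ite] would raise IndexError (outside Pre_)
  | some v =>
    let rep1 := PySem.List.pySetD rep ite (v + 1)     -- rep_list[ite] += 1
    let sr1 := start_range + 1                        -- start_range += 1
    if _h : sr1 > end_range then rep1                 -- break
    else
      let nd := CalculateRepartition.next nbparts ite direction
      CalculateRepartition.loop nbparts rep1 nd.1 sr1 end_range nd.2
termination_by (end_range - start_range).toNat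
decreasing_by omega

def CalculateRepartition (nbparts : Int) (nbseqs : Int) : List Int :=
  let rep_list := (PySem.List.pyRange 0 nbparts 1).foldl (fun acc _ => acc ++ [(0 : Int)]) []
  CalculateRepartition.loop nbparts rep_list 0 0 (nbseqs - 1) 1

-- ===== PORT B =====
def CalculateRepartition_alt (nbparts : Int) (nbseqs : Int) : List Int :=
  let m := max nbseqs 1
  match PySem.Int.divmod? m (2 * nbparts) with
  | none => []         -- divmod(m, 0) raises ZeroDivisionError (outside Pre_)
  | some (full, rem) =>
    -- Python's [x] * c gives [] for c ≤ 0, exactly List.replicate c.toNat x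
    if rem ≤ nbparts then
      List.replicate rem.toNat (2 * full + 1) ++ List.replicate (nbparts - rem).toNat (2 * full)
    else
      let tail := rem - nbparts
      List.replicate (nbparts - tail).toNat (2 * full + 1) ++ List.replicate tail.toNat (2 * full + 2)

-- ===== PRECONDITION & SPEC =====
-- A raises IndexError (rep_list[0] on the empty list) whenever nbparts ≤ 0; nothing else is excluded.
def Pre_CalculateRepartition (nbparts : Int) (nbseqs : Int) : Prop := 1 ≤ nbparts
instance (nbparts : Int) (nbseqs : Int) : Decidable (Pre_CalculateRepartition nbparts nbseqs) := by
  unfold Pre_CalculateRepartition; infer_instance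
def pvWitness_CalculateRepartition : Int × Int := (3, 7)

def Spec_CalculateRepartition (nbparts : Int) (nbseqs : Int) (out : List Int) : Prop := out = CalculateRepartition_alt nbparts nbseqs
instance (nbparts : Int) (nbseqs : Int) (out : List Int) : Decidable (Spec_CalculateRepartition nbparts nbseqs out) := by unfold Spec_CalculateRepartition; infer_instance

-- ===== CLAIM (what is proved, stated in full; the proofs are below) =====
def Claim_equal_CalculateRepartition : Prop := ∀ (nbparts : Int) (nbseqs : Int), Dom_CalculateRepartition nbparts nbseqs → Pre_CalculateRepartition nbparts nbseqs → Spec_CalculateRepartition nbparts nbseqs (CalculateRepartition nbparts nbseqs)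

-- ===== LEMMAS AND PROOFS =====

-- bin visited at step j of the zigzag (cycle length 2*n), and walking direction at step j
def pvPos (n j : Nat) : Nat := if j % (2 * n) < n then j % (2 * n) else 2 * n - 1 - j % (2 * n)
def pvDir (n j : Nat) : Int := if j % (2 * n) < n then 1 else -1
-- number of steps i < T with pvPos n (j + i) = k
def pvCnt (n j T k : Nat) : Nat := (List.range T).countP (fun i => pvPos n (j + i) = k)

lemma pvPos_lt (n j : Nat) (hn : 1 ≤ n) : pvPos n j < n := by
  have := Nat.mod_lt j (show 0 < 2 * n by omega)
  unfold pvPos; split <;> omega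

lemma succ_mod (j m : Nat) (hm : 0 < m) :
    (j + 1) % m = if j % m + 1 = m then 0 else j % m + 1 := by
  conv_lhs => rw [← Nat.mod_add_div j m]
  rw [show j % m + m * (j / m) + 1 = j % m + 1 + m * (j / m) by ring, Nat.add_mul_mod_self_left]
  have := Nat.mod_lt j hm
  split
  · simp_all
  · exact Nat.mod_eq_of_lt (by omega)

-- the branch logic of A's loop advances (ite, direction) one zigzag step
lemma pvStep (n j : Nat) (hn : 1 ≤ n) :
    CalculateRepartition.next (n : Int) (pvPos n j : Nat) (pvDir n j)
      = ((pvPos n (j + 1) : Int), pvDir n (j + 1)) := by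
  have h2n : 0 < 2 * n := by omega
  have hmod : j % (2 * n) < 2 * n := Nat.mod_lt j h2n
  unfold CalculateRepartition.next
  by_cases hc : j % (2 * n) + 1 = 2 * n
  · have hs : (j + 1) % (2 * n) = 0 := by rw [succ_mod _ _ h2n, if_pos hc]
    simp only [pvPos, pvDir, hs]
    obtain ⟨r, hr⟩ : ∃ r, j % (2 * n) = r := ⟨_, rfl⟩
    rw [hr] at hc hmod ⊢
    split_ifs <;> simp only [Prod.mk.injEq, and_true] <;> omega
  · have hs : (j + 1) % (2 * n) = j % (2 * n) + 1 := by rw [succ_mod _ _ h2n, if_neg hc]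
    simp only [pvPos, pvDir, hs]
    obtain ⟨r, hr⟩ : ∃ r, j % (2 * n) = r := ⟨_, rfl⟩
    rw [hr] at hc hmod ⊢
    split_ifs <;> simp only [Prod.mk.injEq, and_true] <;> omega

lemma pvCnt_one (n j k : Nat) : pvCnt n j 1 k = if pvPos n j = k then 1 else 0 := by
  simp [pvCnt, List.countP_cons]

lemma pvCnt_succ (n j T k : Nat) :
    pvCnt n j (T + 1) k = (if pvPos n j = k then 1 else 0) + pvCnt n (j + 1) T k := by
  unfold pvCnt
  rw [List.range_succ_eq_map, List.countP_cons, List.countP_map]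
  have h : ∀ i, (fun i => decide (pvPos n (j + i) = k)) (i + 1)
      = (fun i => decide (pvPos n (j + 1 + i) = k)) i := by
    intro i; simp [Nat.add_comm, Nat.add_left_comm]
  simp only [Function.comp_def, h]
  simp [Nat.add_comm]

lemma pvCnt_last (n T k : Nat) :
    pvCnt n 0 (T + 1) k = pvCnt n 0 T k + (if pvPos n T = k then 1 else 0) := by
  unfold pvCnt
  rw [List.range_succ, List.countP_append]
  simp [List.countP_cons]

lemma succ_div (j m : Nat) (hm : 0 < m) :
    (j + 1) / m = if j % m + 1 = m then j / m + 1 else j / m := by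
  conv_lhs => rw [← Nat.mod_add_div j m]
  rw [show j % m + m * (j / m) + 1 = j % m + 1 + m * (j / m) by ring,
    Nat.add_mul_div_left _ _ hm]
  have := Nat.mod_lt j hm
  split
  · rw [show j % m + 1 = m by assumption, Nat.div_self hm]; omega
  · rw [Nat.div_eq_of_lt (by omega), Nat.zero_add]

lemma pvCnt_closed (n m k : Nat) (hn : 1 ≤ n) (hk : k < n) :
    pvCnt n 0 m k = 2 * (m / (2 * n)) + (if k < m % (2 * n) then 1 else 0)
      + (if 2 * n - m % (2 * n) ≤ k then 1 else 0) := by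
  have h2n : 0 < 2 * n := by omega
  induction m with
  | zero => simp [pvCnt]; omega
  | succ m ih =>
    rw [pvCnt_last, ih]
    have hml : m % (2 * n) < 2 * n := Nat.mod_lt m h2n
    by_cases hc : m % (2 * n) + 1 = 2 * n
    · have hs : (m + 1) % (2 * n) = 0 := by rw [succ_mod _ _ h2n, if_pos hc]
      have hd : (m + 1) / (2 * n) = m / (2 * n) + 1 := by rw [succ_div _ _ h2n, if_pos hc]
      rw [hs, hd]
      unfold pvPos
      split_ifs <;> omega
    · have hs : (m + 1) % (2 * n) = m % (2 * n) + 1 := by rw [succ_mod _ _ h2n, if_neg hc]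
      have hd : (m + 1) / (2 * n) = m / (2 * n) := by rw [succ_div _ _ h2n, if_neg hc]
      rw [hs, hd]
      unfold pvPos
      split_ifs <;> omega

lemma loop_spec (t : Nat) : ∀ (n j : Nat) (sr er : Int) (rep : List Int),
    1 ≤ n → rep.length = n → (er - sr).toNat = t →
    CalculateRepartition.loop (n : Int) rep (pvPos n j : Nat) sr er (pvDir n j) =
      (List.range n).map (fun k => rep.getD k 0 + (pvCnt n j (t + 1) k : Int)) := by
  induction t with
  | zero =>
    intro n j sr er rep hn hlen ht
    have hp : pvPos n j < n := pvPos_lt n j hn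
    rw [CalculateRepartition.loop]
    rw [PySem.List.pyGet?_natCast, List.getElem?_eq_getElem (by omega)]
    simp only [PySem.List.pySetD_natCast]
    rw [dif_pos (by omega)]
    apply List.ext_getElem (by simp [hlen])
    intro i h1 h2
    have hi : i < rep.length := by simp at h1; omega
    rw [List.getElem_set, List.getElem_map, List.getElem_range, pvCnt_one,
      List.getD_eq_getElem rep 0 hi]
    split_ifs with hpi
    · simp only [hpi]; push_cast; ring
    · push_cast; ring
  | succ t ih =>
    intro n j sr er rep hn hlen ht
    have hp : pvPos n j < n := pvPos_lt n j hn
    rw [CalculateRepartition.loop]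
    rw [PySem.List.pyGet?_natCast, List.getElem?_eq_getElem (by omega)]
    simp only [PySem.List.pySetD_natCast]
    rw [dif_neg (by omega)]
    simp only [pvStep n j hn]
    rw [ih n (j + 1) (sr + 1) er _ hn (by simp [hlen]) (by omega)]
    apply List.map_congr_left
    intro k hk
    have hkn : k < n := List.mem_range.mp hk
    have hkr : k < rep.length := by omega
    have hks : k < (rep.set (pvPos n j) (rep[pvPos n j] + 1)).length := by simp; omega
    rw [pvCnt_succ n j (t + 1) k, List.getD_eq_getElem _ 0 hks,
      List.getD_eq_getElem rep 0 hkr, List.getElem_set]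
    split_ifs with hpk
    · simp only [hpk]; push_cast; ring
    · push_cast; ring

lemma rep0_eq (l : List Int) (acc : List Int) :
    l.foldl (fun a _ => a ++ [(0 : Int)]) acc = acc ++ List.replicate l.length 0 := by
  induction l generalizing acc with
  | nil => simp
  | cons x xs ih =>
    rw [List.foldl_cons, ih]
    simp [List.replicate_succ, List.append_assoc]

lemma pvReplCat (a b : Nat) (x y : Int) (i : Nat)
    (h : i < (List.replicate a x ++ List.replicate b y).length) :
    (List.replicate a x ++ List.replicate b y)[i] = if i < a then x else y := by
  rcases Nat.lt_or_ge i a with hi | hi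
  · rw [List.getElem_append_left (by simpa), List.getElem_replicate, if_pos hi]
  · rw [List.getElem_append_right (by simpa), List.getElem_replicate, if_neg (by omega)]

lemma pvDivmod (a b : Int) (h : b ≠ 0) :
    PySem.Int.divmod? a b = some (PySem.Int.floordiv a b, PySem.Int.mod a b) := by
  unfold PySem.Int.divmod? PySem.Int.floordiv PySem.Int.mod
  split <;> simp_all

-- ===== VERDICT (by name: the statement is the Claim_ definition above) =====
theorem CalculateRepartition_spec : Claim_equal_CalculateRepartition := by
  intro nbparts nbseqs _ hpre
  unfold Pre_CalculateRepartition at hpre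
  unfold Spec_CalculateRepartition CalculateRepartition CalculateRepartition_alt
  obtain ⟨n, rfl⟩ : ∃ n : Nat, nbparts = (n : Int) :=
    ⟨nbparts.toNat, (Int.toNat_of_nonneg (by omega)).symm⟩
  have hn : 1 ≤ n := by exact_mod_cast hpre
  have hrep0 : (PySem.List.pyRange 0 (n : Int) 1).foldl (fun a _ => a ++ [(0 : Int)]) []
      = List.replicate n 0 := by
    rw [rep0_eq]
    simp [PySem.List.pyRange_zero_natCast]
  have hp0 : ((pvPos n 0 : Nat) : Int) = 0 := by
    unfold pvPos; rw [Nat.zero_mod, if_pos (by omega)]; rfl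
  have hd0 : pvDir n 0 = 1 := by
    unfold pvDir; rw [Nat.zero_mod, if_pos (by omega)]
  have hA := loop_spec ((nbseqs - 1).toNat) n 0 0 (nbseqs - 1) (List.replicate n 0) hn
    (by simp) (by simp)
  rw [hp0, hd0] at hA
  simp only [hrep0, hA]
  -- B side
  rw [show max nbseqs 1 = (((max nbseqs 1).toNat : Nat) : Int) by omega,
    show (2 : Int) * (n : Int) = ((2 * n : Nat) : Int) by push_cast; ring,
    pvDivmod _ _ (by omega), PySem.Int.floordiv_natCast, PySem.Int.mod_natCast]
  dsimp only
  have hm' : (nbseqs - 1).toNat + 1 = (max nbseqs 1).toNat := by omega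
  rw [hm']
  have hr2 : (max nbseqs 1).toNat % (2 * n) < 2 * n := Nat.mod_lt _ (by omega)
  obtain ⟨r, hr⟩ : ∃ r, (max nbseqs 1).toNat % (2 * n) = r := ⟨_, rfl⟩
  obtain ⟨q, hq⟩ : ∃ q, (max nbseqs 1).toNat / (2 * n) = q := ⟨_, rfl⟩
  rw [hr] at hr2
  rw [hr, hq]
  by_cases hb : r ≤ n
  · rw [if_pos (by exact_mod_cast hb)]
    rw [show ((r : Int)).toNat = r by omega, show ((n : Int) - (r : Int)).toNat = n - r by omega]
    apply List.ext_getElem (by simp; omega)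
    intro i h1 h2
    have hin : i < n := by simp at h1; omega
    rw [List.getElem_map, List.getElem_range, pvReplCat, pvCnt_closed n _ i hn hin, hr, hq]
    have hgd : (List.replicate n (0 : Int)).getD i 0 = 0 := by simp
    rw [hgd]
    split_ifs <;> push_cast <;> omega
  · rw [if_neg (by exact_mod_cast hb)]
    rw [show ((n : Int) - ((r : Int) - (n : Int))).toNat = n - (r - n) by omega,
      show (((r : Int) - (n : Int))).toNat = r - n by omega]
    apply List.ext_getElem (by simp; omega)
    intro i h1 h2
    have hin : i < n := by simp at h1; omega
    rw [List.getElem_map, List.getElem_range, pvReplCat, pvCnt_closed n _ i hn hin, hr, hq]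
    have hgd : (List.replicate n (0 : Int)).getD i 0 = 0 := by simp
    rw [hgd]
    split_ifs <;> push_cast <;> omega
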